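-- pv_equiv track=rewrite | github.com/bmanandhar/python-practice | isogram_matcher.py | isogram_matcher
-- ===== SOURCE A (Python) =====
-- def isogram_matcher(word1, word2):
--     #x-> number of matching letters at the same positions
--     #y-> numbers of matching letters at different positions
--     x, y = 0, 0
--
--     for i in range(len(word1)):
--         if word1[i] == word2[i]:
--             x += 1
--
--         for j in range(len(word1)):
--             if word1[i] == word2[j]\
--             and i != j:
--                 y += 1
--
--     return [x, y]
-- ===== SOURCE B (Python) =====
-- def isogram_matcher(word1, word2):
--     n = len(word1)
--     freq = {}
--     for c in word2[:n]:
--         freq[c] = freq.get(c, 0) + 1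
--     x = sum(1 for a, b in zip(word1, word2) if a == b)
--     y = sum(freq.get(c, 0) for c in word1) - x
--     return [x, y]
-- ===== Notes on version B (the rewrite author's own statement) =====
-- stated objective: faster
-- what changed: Replaces A's nested O(n^2) index loops by one frequency dictionary of word2[:len(word1)] built in a single pass, so y is computed as sum(freq[c] for c in word1) minus the same-position matches x, with no inner scan.
import Mathlib
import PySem

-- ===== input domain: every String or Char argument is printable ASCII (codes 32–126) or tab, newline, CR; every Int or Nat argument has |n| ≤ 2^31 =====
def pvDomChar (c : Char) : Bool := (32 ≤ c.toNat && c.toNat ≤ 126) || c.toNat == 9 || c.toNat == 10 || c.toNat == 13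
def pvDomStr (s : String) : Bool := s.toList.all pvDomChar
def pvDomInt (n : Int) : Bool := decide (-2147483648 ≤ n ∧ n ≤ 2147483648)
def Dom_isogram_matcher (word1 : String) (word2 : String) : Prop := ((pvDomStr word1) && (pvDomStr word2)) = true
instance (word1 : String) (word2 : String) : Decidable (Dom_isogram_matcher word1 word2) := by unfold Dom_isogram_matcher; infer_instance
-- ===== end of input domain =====

-- B replaces A's nested index loops by a one-pass frequency dictionary of word2[:len(word1)]
-- (objective: faster). The equivalence is about the return value; neither version mutates its arguments.

-- ===== PORT A =====
def isogram_matcher (word1 : String) (word2 : String) : List Int :=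
  let w1 := word1.toList
  let w2 := word2.toList
  let s := (PySem.List.pyRange 0 (w1.length : Int) 1).foldl
    (fun (s : Int × Int) i =>
      ((if PySem.List.pyGetD w1 i ' ' = PySem.List.pyGetD w2 i ' ' then s.1 + 1 else s.1),
       (PySem.List.pyRange 0 (w1.length : Int) 1).foldl
         (fun y j =>
           if PySem.List.pyGetD w1 i ' ' = PySem.List.pyGetD w2 j ' ' ∧ i ≠ j then y + 1 else y)
         s.2))
    (0, 0)
  [s.1, s.2]

-- ===== PORT B =====
def isogram_matcher_alt (word1 : String) (word2 : String) : List Int :=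
  let w1 := word1.toList
  let w2 := word2.toList
  let n := w1.length
  let freq := (PySem.List.slice w2 none (some (n : Int))).foldl
      (fun (d : PySem.Dict Char Int) c => d.insert c (d.getD c 0 + 1)) PySem.Dict.empty
  let x := (w1.zip w2).foldl (fun (acc : Int) p => if p.1 = p.2 then acc + 1 else acc) 0
  let y := w1.foldl (fun (acc : Int) c => acc + freq.getD c 0) 0 - x
  [x, y]

-- ===== PRECONDITION & SPEC =====
-- A indexes word2 at every position of word1, so it raises IndexError iff len(word2) < len(word1);
-- Pre_ excludes exactly those inputs.
def Pre_isogram_matcher (word1 : String) (word2 : String) : Prop :=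
  word1.toList.length ≤ word2.toList.length
instance (word1 : String) (word2 : String) : Decidable (Pre_isogram_matcher word1 word2) := by
  unfold Pre_isogram_matcher; infer_instance
def pvWitness_isogram_matcher : String × String := ("abca", "badc")

def Spec_isogram_matcher (word1 : String) (word2 : String) (out : List Int) : Prop :=
  out = isogram_matcher_alt word1 word2
instance (word1 : String) (word2 : String) (out : List Int) : Decidable (Spec_isogram_matcher word1 word2 out) := by
  unfold Spec_isogram_matcher; infer_instance

-- ===== CLAIM (what is proved, stated in full; the proofs are below) =====
def Claim_equal_isogram_matcher : Prop := ∀ (word1 : String) (word2 : String), Dom_isogram_matcher word1 word2 → Pre_isogram_matcher word1 word2 → Spec_isogram_matcher word1 word2 (isogram_matcher word1 word2)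

-- ===== LEMMAS AND PROOFS =====

-- a countP, read off position by position
theorem countP_eq_countP_range {α : Type} (l : List α) (p : α → Bool) (d : α) :
    l.countP p = (List.range l.length).countP (fun j => p (l.getD j d)) := by
  induction l with
  | nil => simp
  | cons c l ih =>
    simp [List.countP_cons, List.range_succ_eq_map, List.countP_map, Function.comp_def, ih]

-- same-position matches: A's index form = B's zip form
theorem countP_same_pos (a b : List Char) (h : a.length ≤ b.length) :
    (List.range a.length).countP (fun k => decide (a.getD k ' ' = b.getD k ' ')) =
      (a.zip b).countP (fun p => decide (p.1 = p.2)) := by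
  induction a generalizing b with
  | nil => simp
  | cons c a ih =>
    cases b with
    | nil => simp at h
    | cons e b =>
      simp only [List.length_cons, List.range_succ_eq_map, List.countP_cons,
        List.countP_map, Function.comp_def, List.zip_cons_cons]
      have := ih b (by simpa using h)
      simp only [List.getD_cons_succ, List.getD_cons_zero] at *
      omega

-- split a countP at one distinguished element
theorem countP_split {α : Type} [DecidableEq α] (l : List α) (P : α → Prop) [DecidablePred P] (k : α) :
    l.countP (fun j => decide (P j ∧ j ≠ k)) + l.countP (fun j => decide (P j ∧ j = k)) =
      l.countP (fun j => decide (P j)) := by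
  induction l with
  | nil => simp
  | cons c l ih =>
    simp only [List.countP_cons]
    have hhead : ((if decide (P c ∧ c ≠ k) = true then 1 else 0) : Nat) +
        (if decide (P c ∧ c = k) = true then 1 else 0) = if decide (P c) = true then 1 else 0 := by
      by_cases hP : P c <;> by_cases hk : c = k <;> simp [hP, hk]
    omega

-- on a Nodup list containing k, the part of a countP pinned to j = k is a 0/1 indicator
theorem countP_eq_self {α : Type} [DecidableEq α] (l : List α) (P : α → Prop) [DecidablePred P]
    (k : α) (hnd : l.Nodup) (hk : k ∈ l) :
    l.countP (fun j => decide (P j ∧ j = k)) = if P k then 1 else 0 := by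
  induction l with
  | nil => simp at hk
  | cons c l ih =>
    simp only [List.nodup_cons] at hnd
    rcases List.mem_cons.mp hk with rfl | hk'
    · have hz : l.countP (fun j => decide (P j ∧ j = k)) = 0 := by
        rw [List.countP_eq_zero]
        intro x hx
        simp only [decide_eq_true_eq, not_and]
        intro _ hxk; exact absurd (hxk ▸ hx) hnd.1
      rw [List.countP_cons, hz]
      by_cases hP : P k <;> simp [hP]
    · have hck : c ≠ k := fun hc => hnd.1 (hc ▸ hk')
      rw [List.countP_cons, ih hnd.2 hk']
      simp [hck]

-- a map over a list, read off position by position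
theorem map_eq_map_range {α β : Type} (l : List α) (d : α) (g : α → β) :
    l.map g = (List.range l.length).map (fun k => g (l.getD k d)) := by
  induction l with
  | nil => simp
  | cons c l ih =>
    simp only [List.map_cons, List.length_cons, List.range_succ_eq_map, List.map_map,
      Function.comp_def, List.getD_cons_succ, List.getD_cons_zero]
    exact congrArg _ ih

theorem sum_map_sub_int {α : Type} (xs : List α) (f g : α → ℤ) :
    (xs.map (fun x => f x - g x)).sum = (xs.map f).sum - (xs.map g).sum := by
  induction xs with
  | nil => simp
  | cons c xs ih => simp [ih]; ring

-- ===== VERDICT (by name: the statement is the Claim_ definition above) =====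
theorem isogram_matcher_spec : Claim_equal_isogram_matcher := by
  intro word1 word2 _ hpre
  unfold Spec_isogram_matcher isogram_matcher isogram_matcher_alt
  dsimp only
  set a := word1.toList with ha
  set b := word2.toList with hb
  have h : a.length ≤ b.length := hpre
  set n := a.length with hn
  -- reduce B: the slice, the counter loop, the zip loop, the lookup loop
  rw [PySem.List.slice_to_natCast, PySem.Dict.foldl_insert_getD_add_one_eq_counter,
    PySem.List.foldl_ite_add_one (fun p : Char × Char => p.1 = p.2),
    PySem.List.foldl_add]
  -- reduce A: split the pair fold, then each component
  rw [PySem.List.foldl_prod_mk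
       (f := fun (s1 : Int) i => if PySem.List.pyGetD a i ' ' = PySem.List.pyGetD b i ' ' then s1 + 1 else s1)
       (g := fun (s2 : Int) i => (PySem.List.pyRange 0 (n : Int) 1).foldl
          (fun y j => if PySem.List.pyGetD a i ' ' = PySem.List.pyGetD b j ' ' ∧ i ≠ j then y + 1 else y) s2)]
  rw [PySem.List.foldl_ite_add_one (fun i => PySem.List.pyGetD a i ' ' = PySem.List.pyGetD b i ' ')]
  rw [PySem.List.foldl_congr_mem _ _
       (fun (s2 : Int) i => s2 + ((PySem.List.pyRange 0 (n : Int) 1).countP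
          (fun j => decide (PySem.List.pyGetD a i ' ' = PySem.List.pyGetD b j ' ' ∧ i ≠ j)) : Int))
       _
       (by
         intro acc i _
         exact PySem.List.foldl_ite_add_one
           (fun j => PySem.List.pyGetD a i ' ' = PySem.List.pyGetD b j ' ' ∧ i ≠ j) _ acc)]
  rw [PySem.List.foldl_add]
  -- move everything to Nat indices over List.range
  rw [PySem.List.pyRange_zero_nat n]
  simp only [List.countP_map, List.map_map, Function.comp_def, PySem.List.pyGetD_natCast,
    ne_eq, Nat.cast_inj, zero_add, List.cons.injEq, and_true]
  have hx : (List.range n).countP (fun k => decide (a.getD k ' ' = b.getD k ' ')) =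
      (a.zip b).countP (fun p => decide (p.1 = p.2)) := countP_same_pos a b h
  refine ⟨hx, ?_⟩
  -- rewrite the RHS sum over a as a sum over indices
  rw [map_eq_map_range a ' ' (fun c => (PySem.Dict.counter (List.take n b)).getD c 0)]
  -- pointwise: A's inner count at k = full frequency of a[k] in b[:n] minus the same-position hit
  have hpoint : ∀ k ∈ List.range n,
      ((List.countP (fun j => decide (a.getD k ' ' = b.getD j ' ' ∧ ¬ k = j)) (List.range n) : ℤ)) =
        (fun k => (PySem.Dict.counter (List.take n b)).getD (a.getD k ' ') 0) k -
          (fun k => if (fun k => decide (a.getD k ' ' = b.getD k ' ')) k = true then (1:ℤ) else 0) k := by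
    intro k hk
    dsimp only
    simp only [PySem.Dict.getD_counter, decide_eq_true_eq]
    have hsplit := countP_split (List.range n) (fun j => b.getD j ' ' = a.getD k ' ') k
    have hself := countP_eq_self (List.range n) (fun j => b.getD j ' ' = a.getD k ' ') k
      List.nodup_range hk
    dsimp only at hsplit hself
    have hcount : (List.take n b).count (a.getD k ' ') =
        List.countP (fun j => decide (b.getD j ' ' = a.getD k ' ')) (List.range n) := by
      rw [List.count_eq_countP, countP_eq_countP_range (List.take n b) _ ' ']
      have hlen : (List.take n b).length = n := by simp; omega
      rw [hlen]
      refine List.countP_congr ?_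
      intro j hj
      have hjn : j < n := List.mem_range.mp hj
      have hget : (List.take n b).getD j ' ' = b.getD j ' ' := by
        have h1 : j < (List.take n b).length := by omega
        have h2 : j < b.length := by omega
        rw [List.getD_eq_getElem _ _ h1, List.getD_eq_getElem _ _ h2, List.getElem_take]
      rw [hget]
      simp
    have hne : (fun j => decide (a.getD k ' ' = b.getD j ' ' ∧ ¬ k = j)) =
        (fun j => decide (b.getD j ' ' = a.getD k ' ' ∧ j ≠ k)) := by
      funext j
      rw [decide_eq_decide]
      constructor <;> rintro ⟨hA, hne⟩ <;> exact ⟨hA.symm, fun e => hne e.symm⟩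
    rw [hself] at hsplit
    rw [hne, hcount]
    have hsym : (a.getD k ' ' = b.getD k ' ') ↔ (b.getD k ' ' = a.getD k ' ') := eq_comm
    by_cases hif : b.getD k ' ' = a.getD k ' '
    · rw [if_pos hif] at hsplit
      rw [if_pos (hsym.mpr hif)]
      omega
    · rw [if_neg hif] at hsplit
      rw [if_neg (fun e => hif (hsym.mp e))]
      omega
  rw [List.map_congr_left hpoint]
  rw [sum_map_sub_int]
  rw [PySem.List.sum_map_ite_one_zero (fun k => decide (a.getD k ' ' = b.getD k ' ')) (List.range n)]
  rw [hx]
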